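-- pv_equiv track=rewrite | github.com/Reneromero08/agent-governance-system | CAPABILITY/SKILLS/utilities/prompt-runner/run.py | _match_required_sections
-- ===== SOURCE A (Python) =====
-- from typing import Any, Dict, List, Optional, Tuple
--
-- REQUIRED_SECTIONS = [
--     "ROLE + MODEL",
--     "GOAL",
--     "SCOPE (WRITE ALLOWLIST)",
--     "REQUIRED FACTS",
--     "PLAN",
--     "VALIDATION",
--     "ARTIFACTS",
--     "EXIT CRITERIA",
-- ]
--
-- def _match_required_sections(headings: List[str]) -> List[str]:
--     missing = []
--     for required in REQUIRED_SECTIONS: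
--         required_lower = required.strip().lower()
--         found = False
--         for heading in headings:
--             if heading.strip().lower().startswith(required_lower):
--                 found = True
--                 break
--         if not found:
--             missing.append(required)
--     return missing
-- ===== SOURCE B (Python) =====
-- REQUIRED_SECTIONS = [
--     "ROLE + MODEL",
--     "GOAL",
--     "SCOPE (WRITE ALLOWLIST)",
--     "REQUIRED FACTS",
--     "PLAN",
--     "VALIDATION",
--     "ARTIFACTS",
--     "EXIT CRITERIA",
-- ]
--
-- def _match_required_sections(headings):
--     # One pass over headings: normalize each heading once and record which
--     # required sections it satisfies; then filter REQUIRED_SECTIONS in order.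
--     matched = set()
--     for heading in headings:
--         norm = heading.strip().lower()
--         for required in REQUIRED_SECTIONS:
--             if norm.startswith(required.strip().lower()):
--                 matched.add(required)
--     return [req for req in REQUIRED_SECTIONS if req not in matched]
-- ===== Notes on version B (the rewrite author's own statement) =====
-- stated objective: alternative
-- what changed: B inverts the loop nesting: one pass over headings normalizing each heading once and accumulating a set of satisfied required sections, then a final order-preserving filter of REQUIRED_SECTIONS, instead of A's per-required rescans of headings with a break flag.
import Mathlib
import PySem

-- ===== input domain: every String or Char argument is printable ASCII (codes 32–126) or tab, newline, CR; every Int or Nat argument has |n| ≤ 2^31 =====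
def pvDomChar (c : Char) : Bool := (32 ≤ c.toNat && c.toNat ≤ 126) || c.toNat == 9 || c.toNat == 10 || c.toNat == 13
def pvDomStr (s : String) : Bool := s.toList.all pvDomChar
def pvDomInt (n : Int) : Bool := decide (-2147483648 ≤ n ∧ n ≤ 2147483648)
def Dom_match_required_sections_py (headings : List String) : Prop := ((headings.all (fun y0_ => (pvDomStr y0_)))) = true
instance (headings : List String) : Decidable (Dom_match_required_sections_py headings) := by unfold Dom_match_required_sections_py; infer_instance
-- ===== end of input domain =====

-- B inverts the loop nesting (one pass over headings building a matched set, then an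
-- order-preserving filter of REQUIRED_SECTIONS) instead of A's per-required rescans; same cost.

def pvReqSections : List String :=
  ["ROLE + MODEL", "GOAL", "SCOPE (WRITE ALLOWLIST)", "REQUIRED FACTS",
   "PLAN", "VALIDATION", "ARTIFACTS", "EXIT CRITERIA"]

-- ===== PORT A =====
-- A's inner 'for heading in headings: … break' loop with its found flag
def pvFoundA (requiredLower : String) (hs : List String) : Bool :=
  match hs with
  | [] => false
  | h :: t =>
    if PySem.Str.startswith (PySem.Str.lower (PySem.Str.strip h)) requiredLower then true
    else pvFoundA requiredLower t

-- required_lower = required.strip().lower() is inlined at its single use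
def match_required_sections_py (headings : List String) : List String :=
  pvReqSections.foldl (fun missing required =>
    if pvFoundA (PySem.Str.lower (PySem.Str.strip required)) headings then missing
    else missing ++ [required]) []

-- ===== PORT B =====
def match_required_sections_py_alt (headings : List String) : List String :=
  let matched : PySem.Set String := headings.foldl (fun acc heading =>
    let norm := PySem.Str.lower (PySem.Str.strip heading)
    pvReqSections.foldl (fun acc required =>
      if PySem.Str.startswith norm (PySem.Str.lower (PySem.Str.strip required)) then
        PySem.Set.add acc required
      else acc) acc) PySem.Set.empty
  pvReqSections.filter (fun req => !(PySem.Set.contains matched req))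

-- ===== PRECONDITION & SPEC =====
def Spec_match_required_sections_py (headings : List String) (out : List String) : Prop := out = match_required_sections_py_alt headings
instance (headings : List String) (out : List String) : Decidable (Spec_match_required_sections_py headings out) := by unfold Spec_match_required_sections_py; infer_instance

-- ===== CLAIM (what is proved, stated in full; the proofs are below) =====
def Claim_equal_match_required_sections_py : Prop := ∀ (headings : List String), Dom_match_required_sections_py headings → Spec_match_required_sections_py headings (match_required_sections_py headings)

-- ===== LEMMAS AND PROOFS =====

theorem pvFoundA_eq_any (rl : String) (hs : List String) :
    pvFoundA rl hs
      = hs.any (fun h => PySem.Str.startswith (PySem.Str.lower (PySem.Str.strip h)) rl) := by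
  induction hs with
  | nil => rfl
  | cons h t ih =>
    rw [pvFoundA, List.any_cons]
    split_ifs with hc
    · rw [hc, Bool.true_or]
    · rw [Bool.not_eq_true] at hc
      rw [hc, Bool.false_or, ih]

theorem foldl_skip_if {α : Type} (p : α → Bool) (l : List α) (acc : List α) :
    l.foldl (fun acc x => if p x then acc else acc ++ [x]) acc
      = acc ++ l.filter (fun x => !p x) := by
  induction l generalizing acc with
  | nil => simp
  | cons x t ih =>
    rw [List.foldl_cons]
    cases hx : p x <;> simp [hx, ih]

theorem portA_eq_filter (headings : List String) :
    match_required_sections_py headings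
      = pvReqSections.filter (fun r =>
          !(headings.any (fun h => PySem.Str.startswith (PySem.Str.lower (PySem.Str.strip h))
              (PySem.Str.lower (PySem.Str.strip r))))) := by
  unfold match_required_sections_py
  rw [foldl_skip_if (fun required => pvFoundA (PySem.Str.lower (PySem.Str.strip required)) headings)
      pvReqSections [], List.nil_append]
  refine List.filter_congr ?_
  intro r _
  rw [pvFoundA_eq_any]

theorem mem_inner (acc : PySem.Set String) (norm : String) (rs : List String) (r : String) :
    (r ∈ rs.foldl (fun acc required =>
        if PySem.Str.startswith norm (PySem.Str.lower (PySem.Str.strip required)) then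
          PySem.Set.add acc required
        else acc) acc)
      ↔ r ∈ acc ∨ (r ∈ rs ∧ PySem.Str.startswith norm (PySem.Str.lower (PySem.Str.strip r)) = true) := by
  induction rs generalizing acc with
  | nil => simp
  | cons x t ih =>
    rw [List.foldl_cons]
    split_ifs with hx
    · rw [ih]
      rw [PySem.Set.mem_add]
      constructor
      · rintro ((h | rfl) | ⟨hm, hs⟩)
        · exact Or.inl h
        · exact Or.inr ⟨List.mem_cons_self, hx⟩
        · exact Or.inr ⟨List.mem_cons_of_mem _ hm, hs⟩
      · rintro (h | ⟨hm, hs⟩)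
        · exact Or.inl (Or.inl h)
        · rcases List.mem_cons.mp hm with rfl | hm
          · exact Or.inl (Or.inr rfl)
          · exact Or.inr ⟨hm, hs⟩
    · rw [ih]
      constructor
      · rintro (h | ⟨hm, hs⟩)
        · exact Or.inl h
        · exact Or.inr ⟨List.mem_cons_of_mem _ hm, hs⟩
      · rintro (h | ⟨hm, hs⟩)
        · exact Or.inl h
        · rcases List.mem_cons.mp hm with rfl | hm
          · exact absurd hs hx
          · exact Or.inr ⟨hm, hs⟩

theorem mem_matched (hs : List String) (acc : PySem.Set String) (r : String) :
    (r ∈ hs.foldl (fun acc heading =>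
        let norm := PySem.Str.lower (PySem.Str.strip heading)
        pvReqSections.foldl (fun acc required =>
          if PySem.Str.startswith norm (PySem.Str.lower (PySem.Str.strip required)) then
            PySem.Set.add acc required
          else acc) acc) acc)
      ↔ r ∈ acc ∨ (r ∈ pvReqSections ∧
          hs.any (fun h => PySem.Str.startswith (PySem.Str.lower (PySem.Str.strip h))
            (PySem.Str.lower (PySem.Str.strip r))) = true) := by
  induction hs generalizing acc with
  | nil => simp
  | cons h t ih =>
    rw [List.foldl_cons, List.any_cons, ih, mem_inner]
    rw [Bool.or_eq_true]
    constructor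
    · rintro ((ha | ⟨hm, hp⟩) | ⟨hm, hp⟩)
      · exact Or.inl ha
      · exact Or.inr ⟨hm, Or.inl hp⟩
      · exact Or.inr ⟨hm, Or.inr hp⟩
    · rintro (ha | ⟨hm, hp | hp⟩)
      · exact Or.inl (Or.inl ha)
      · exact Or.inl (Or.inr ⟨hm, hp⟩)
      · exact Or.inr ⟨hm, hp⟩

theorem portB_eq_filter (headings : List String) :
    match_required_sections_py_alt headings
      = pvReqSections.filter (fun r =>
          !(headings.any (fun h => PySem.Str.startswith (PySem.Str.lower (PySem.Str.strip h))
              (PySem.Str.lower (PySem.Str.strip r))))) := by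
  unfold match_required_sections_py_alt
  refine List.filter_congr ?_
  intro r hr
  have hmem := mem_matched headings PySem.Set.empty r
  rw [show (PySem.Set.empty : PySem.Set String) = [] from rfl] at hmem
  have hiff : r ∈ headings.foldl (fun acc heading =>
        let norm := PySem.Str.lower (PySem.Str.strip heading)
        pvReqSections.foldl (fun acc required =>
          if PySem.Str.startswith norm (PySem.Str.lower (PySem.Str.strip required)) then
            PySem.Set.add acc required
          else acc) acc) PySem.Set.empty
      ↔ (headings.any (fun h => PySem.Str.startswith (PySem.Str.lower (PySem.Str.strip h))
          (PySem.Str.lower (PySem.Str.strip r)))) = true := by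
    constructor
    · intro h
      rcases hmem.mp h with h0 | ⟨_, hp⟩
      · exact absurd h0 List.not_mem_nil
      · exact hp
    · intro hp
      exact hmem.mpr (Or.inr ⟨hr, hp⟩)
  have hc : List.contains (headings.foldl (fun acc heading =>
        let norm := PySem.Str.lower (PySem.Str.strip heading)
        pvReqSections.foldl (fun acc required =>
          if PySem.Str.startswith norm (PySem.Str.lower (PySem.Str.strip required)) then
            PySem.Set.add acc required
          else acc) acc) PySem.Set.empty) r
      = headings.any (fun h => PySem.Str.startswith (PySem.Str.lower (PySem.Str.strip h))
          (PySem.Str.lower (PySem.Str.strip r))) := by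
    rw [Bool.eq_iff_iff, List.contains_iff_mem]
    exact hiff
  exact congrArg (fun b => !b) hc

-- ===== VERDICT (by name: the statement is the Claim_ definition above) =====
theorem match_required_sections_py_spec : Claim_equal_match_required_sections_py := by
  intro headings _
  unfold Spec_match_required_sections_py
  rw [portA_eq_filter, portB_eq_filter]
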